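-- pv_equiv track=rewrite | github.com/Ogutu-Brian/TweetAnalysis | tweets.py | most_popular
-- ===== SOURCE A (Python) =====
-- from typing import List, Dict, TextIO, Tuple
--
-- TWEET_DATE_INDEX = 1
--
-- TWEET_FAVOURITE_INDEX = 3
--
-- TWEET_RETWEET_INDEX = 4
--
-- def most_popular(read_tweets_dict: Dict[str, List[tuple]],
--                  date_1: int, date_2: int) -> str:
--     """Returns username of twitter user who was most popular on twitter
--     between date_1 and date_2
--     @type read_dict_tweets_dict: Dict[str, List[tupple]]
--     @type date_1: int
--     @type date_2: int
--     @rtype: str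
--     """
--     keys = []
--     for key in read_tweets_dict.keys():
--         if read_tweets_dict[key][0][TWEET_DATE_INDEX] in range(date_1, date_2 + 1):
--             keys.append(key)
--     if len(keys) == 0:
--         return "tie"
--     largest_key = keys[0]
--     is_multiple = False
--     count = 1
--     while count < len(keys):
--         key = keys[count]
--         if ((popularity(key, read_tweets_dict))
--                 >= (popularity(largest_key, read_tweets_dict))):
--                 is_multiple = ((popularity(key, read_tweets_dict))
--                                == (popularity(largest_key, read_tweets_dict)))
--                 largest_key = key
--         count += 1
--     if is_multiple:
--         return "tie"
--     return largest_key
--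
-- def popularity(key: str, read_tweets_dict: Dict[str, List[tuple]]) -> int:
--     """Returns the popularity of a given user depending on the key
--     in the dictionary
--     @type key: str
--     @type read_tweets_dict: Dict[str,List[tuple]]
--     @rtype; int
--     """
--     return read_tweets_dict[key][0][TWEET_FAVOURITE_INDEX] +\
--         read_tweets_dict[key][0][TWEET_RETWEET_INDEX]
-- ===== SOURCE B (Python) =====
-- TWEET_DATE_INDEX = 1
-- TWEET_FAVOURITE_INDEX = 3
-- TWEET_RETWEET_INDEX = 4
--
--
-- def most_popular(read_tweets_dict, date_1, date_2):
--     """Sort-based: score every user whose first tweet is in range, sort the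
--     (user, score) pairs by score descending, and read the answer off the top:
--     empty -> "tie", top two scores equal -> "tie", else the top user."""
--     scored = sorted(
--         [(k, t[0][TWEET_FAVOURITE_INDEX] + t[0][TWEET_RETWEET_INDEX])
--          for k, t in read_tweets_dict.items()
--          if t[0][TWEET_DATE_INDEX] in range(date_1, date_2 + 1)],
--         key=lambda p: p[1], reverse=True)
--     if not scored:
--         return "tie"
--     if len(scored) >= 2 and scored[1][1] == scored[0][1]:
--         return "tie"
--     return scored[0][0]
-- ===== Notes on version B (the rewrite author's own statement) =====
-- stated objective: alternative
-- what changed: A's single running-max pass with a last-update is_multiple tie flag is replaced by a sort-based algorithm: score the in-range users, sort the (user, score) pairs by score descending, then return 'tie' if the list is empty or its top two scores are equal, else the top user.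
import Mathlib
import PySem

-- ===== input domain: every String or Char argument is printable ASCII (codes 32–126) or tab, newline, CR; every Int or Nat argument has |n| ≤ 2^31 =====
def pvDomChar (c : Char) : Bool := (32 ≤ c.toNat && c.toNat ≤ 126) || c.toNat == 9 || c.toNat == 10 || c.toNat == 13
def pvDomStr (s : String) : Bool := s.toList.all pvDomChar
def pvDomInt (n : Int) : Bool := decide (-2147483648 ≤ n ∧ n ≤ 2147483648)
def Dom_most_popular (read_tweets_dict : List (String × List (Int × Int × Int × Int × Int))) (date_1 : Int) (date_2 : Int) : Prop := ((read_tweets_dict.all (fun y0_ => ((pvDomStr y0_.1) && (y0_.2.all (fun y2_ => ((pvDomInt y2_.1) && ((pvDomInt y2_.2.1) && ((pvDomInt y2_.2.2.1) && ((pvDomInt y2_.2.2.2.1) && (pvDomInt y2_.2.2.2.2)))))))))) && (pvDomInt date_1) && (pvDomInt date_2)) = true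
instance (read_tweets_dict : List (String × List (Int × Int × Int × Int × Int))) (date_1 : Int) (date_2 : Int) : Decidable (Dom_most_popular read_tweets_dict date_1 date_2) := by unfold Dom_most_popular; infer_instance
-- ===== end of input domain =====

-- B replaces A's running-max pass with a last-update tie flag by a sort-based algorithm:
-- sort the (user, score) pairs by score descending and read the answer off the top two.

-- ===== PORT A =====
-- popularity(key, d) = d[key][0][3] + d[key][0][4]; the [0] is PySem.List.pyGetD
-- (Pre_ guarantees the list is nonempty, so the default is never read inside Pre_).
def pv_popularity (d : PySem.Dict String (List (Int × Int × Int × Int × Int))) (key : String) : Int :=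
  (PySem.List.pyGetD (PySem.Dict.getD d key []) 0 (0, 0, 0, 0, 0)).2.2.2.1 +
    (PySem.List.pyGetD (PySem.Dict.getD d key []) 0 (0, 0, 0, 0, 0)).2.2.2.2

-- the while loop of A: state (largest_key, is_multiple), one step per remaining key
def pv_loopA (d : PySem.Dict String (List (Int × Int × Int × Int × Int))) :
    List String → String → Bool → String × Bool
  | [], largest, mult => (largest, mult)
  | k :: rest, largest, mult =>
    if pv_popularity d largest ≤ pv_popularity d k then
      pv_loopA d rest k (pv_popularity d k == pv_popularity d largest)
    else
      pv_loopA d rest largest mult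

def most_popular (read_tweets_dict : List (String × List (Int × Int × Int × Int × Int))) (date_1 : Int) (date_2 : Int) : String :=
  let d := PySem.Dict.ofList read_tweets_dict
  -- 'date in range(date_1, date_2 + 1)' on Int is exactly the bounds test (PySem.List.mem_pyRange_one)
  let keys := d.keys.foldl (fun ks k =>
    if date_1 ≤ (PySem.List.pyGetD (PySem.Dict.getD d k []) 0 (0, 0, 0, 0, 0)).2.1 ∧
        (PySem.List.pyGetD (PySem.Dict.getD d k []) 0 (0, 0, 0, 0, 0)).2.1 < date_2 + 1
    then ks ++ [k] else ks) []
  match keys with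
  | [] => "tie"
  | k0 :: rest =>
    let r := pv_loopA d rest k0 false
    if r.2 then "tie" else r.1

-- ===== PORT B =====
-- score of a tweet list t: t[0][3] + t[0][4]
def pv_score (t : List (Int × Int × Int × Int × Int)) : Int :=
  (PySem.List.pyGetD t 0 (0, 0, 0, 0, 0)).2.2.2.1 +
    (PySem.List.pyGetD t 0 (0, 0, 0, 0, 0)).2.2.2.2

def most_popular_alt (read_tweets_dict : List (String × List (Int × Int × Int × Int × Int))) (date_1 : Int) (date_2 : Int) : String :=
  let scored := PySem.List.sorted
    (((PySem.Dict.ofList read_tweets_dict).items.filter (fun kv =>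
        decide (date_1 ≤ (PySem.List.pyGetD kv.2 0 (0, 0, 0, 0, 0)).2.1 ∧
          (PySem.List.pyGetD kv.2 0 (0, 0, 0, 0, 0)).2.1 < date_2 + 1))).map
      (fun kv => (kv.1, pv_score kv.2)))
    (fun p => p.2) true
  match scored with
  | [] => "tie"
  | [p] => p.1
  | p :: q :: _ => if q.2 == p.2 then "tie" else p.1

-- ===== PRECONDITION & SPEC =====
-- Pre_ excludes exactly the inputs on which Python A raises IndexError:
-- a user whose tweet list is empty (A indexes d[key][0] for every key).
def Pre_most_popular (read_tweets_dict : List (String × List (Int × Int × Int × Int × Int))) (date_1 : Int) (date_2 : Int) : Prop :=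
  ∀ v ∈ (PySem.Dict.ofList read_tweets_dict).values, v ≠ []
instance (read_tweets_dict : List (String × List (Int × Int × Int × Int × Int))) (date_1 : Int) (date_2 : Int) : Decidable (Pre_most_popular read_tweets_dict date_1 date_2) := by unfold Pre_most_popular; infer_instance

def pvWitness_most_popular : (List (String × List (Int × Int × Int × Int × Int))) × Int × Int :=
  ([("amy", [(1, 3, 0, 2, 2)]), ("bob", [(2, 4, 0, 1, 2)])], 1, 5)

def Spec_most_popular (read_tweets_dict : List (String × List (Int × Int × Int × Int × Int))) (date_1 : Int) (date_2 : Int) (out : String) : Prop := out = most_popular_alt read_tweets_dict date_1 date_2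
instance (read_tweets_dict : List (String × List (Int × Int × Int × Int × Int))) (date_1 : Int) (date_2 : Int) (out : String) : Decidable (Spec_most_popular read_tweets_dict date_1 date_2 out) := by unfold Spec_most_popular; infer_instance

-- ===== CLAIM (what is proved, stated in full; the proofs are below) =====
def Claim_equal_most_popular : Prop := ∀ (read_tweets_dict : List (String × List (Int × Int × Int × Int × Int))) (date_1 : Int) (date_2 : Int), Dom_most_popular read_tweets_dict date_1 date_2 → Pre_most_popular read_tweets_dict date_1 date_2 → Spec_most_popular read_tweets_dict date_1 date_2 (most_popular read_tweets_dict date_1 date_2)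

-- ===== LEMMAS AND PROOFS =====

-- The loop invariant for A's while loop.  With M the running max of popularity over
-- largest :: rest: the loop returns a key attaining M that lies in largest :: rest,
-- its flag is true whenever M is attained at least twice, and if M is attained exactly
-- once the flag is (mult if largest attains M, else false).
theorem pv_loopA_spec (d : PySem.Dict String (List (Int × Int × Int × Int × Int)))
    (rest : List String) : ∀ (largest : String) (mult : Bool),
    (pv_popularity d (pv_loopA d rest largest mult).1 =
        (rest.map (pv_popularity d)).foldl max (pv_popularity d largest) ∧
      (pv_loopA d rest largest mult).1 ∈ largest :: rest) ∧
    (2 ≤ ((largest :: rest).filter (fun k => pv_popularity d k ==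
        (rest.map (pv_popularity d)).foldl max (pv_popularity d largest))).length →
      (pv_loopA d rest largest mult).2 = true) ∧
    (((largest :: rest).filter (fun k => pv_popularity d k ==
        (rest.map (pv_popularity d)).foldl max (pv_popularity d largest))).length = 1 →
      (pv_loopA d rest largest mult).2 =
        (if pv_popularity d largest =
            (rest.map (pv_popularity d)).foldl max (pv_popularity d largest) then mult else false)) := by
  induction rest with
  | nil =>
    intro largest mult
    simp [pv_loopA]
  | cons k rest ih =>
    intro largest mult
    by_cases h : pv_popularity d largest ≤ pv_popularity d k
    · -- update branch
      have hmax : max (pv_popularity d largest) (pv_popularity d k) = pv_popularity d k :=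
        max_eq_right h
      have hloop : pv_loopA d (k :: rest) largest mult =
          pv_loopA d rest k (pv_popularity d k == pv_popularity d largest) := by
        simp [pv_loopA, h]
      have hM' : ((k :: rest).map (pv_popularity d)).foldl max (pv_popularity d largest) =
          (rest.map (pv_popularity d)).foldl max (pv_popularity d k) := by
        simp [List.foldl_cons, hmax]
      obtain ⟨⟨ih1, ih1m⟩, ih2, ih3⟩ := ih k (pv_popularity d k == pv_popularity d largest)
      set M := (rest.map (pv_popularity d)).foldl max (pv_popularity d k) with hMdef
      have hkM : pv_popularity d k ≤ M := (PySem.List.le_foldl_max _ _).1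
      -- M is attained within k :: rest
      have hatt : 1 ≤ ((k :: rest).filter (fun x => pv_popularity d x == M)).length := by
        rcases PySem.List.foldl_max_mem (rest.map (pv_popularity d)) (pv_popularity d k) with hc | hc
        · have hb : (pv_popularity d k == M) = true := by
            rw [hMdef, hc]; simp
          have : k ∈ (k :: rest).filter (fun x => pv_popularity d x == M) := by
            simp [List.mem_filter, hb]
          exact List.length_pos_of_mem this
        · obtain ⟨x, hx, hxv⟩ := List.mem_map.mp hc
          have : x ∈ (k :: rest).filter (fun v => pv_popularity d v == M) := by
            simp [List.mem_filter, hx, hxv, hMdef]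
          exact List.length_pos_of_mem this
      have hsplit : ((largest :: k :: rest).filter (fun x => pv_popularity d x == M)).length =
          (if pv_popularity d largest = M then 1 else 0) +
            ((k :: rest).filter (fun x => pv_popularity d x == M)).length := by
        by_cases hl : pv_popularity d largest = M
        · simp [List.filter_cons, hl]
          omega
        · simp [List.filter_cons, hl]
      refine ⟨⟨?_, ?_⟩, ?_, ?_⟩
      · rw [hloop, hM', ih1]
      · rw [hloop]
        exact List.mem_cons_of_mem _ ih1m
      · -- count ≥ 2 → flag true
        intro h2
        rw [hloop]
        rw [hM'] at h2
        by_cases hl : pv_popularity d largest = M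
        · -- largest attains M; then pop k = M too, so mult' = true
          have hkeq : pv_popularity d k = M := by omega
          have hmult' : (pv_popularity d k == pv_popularity d largest) = true := by
            rw [hkeq, hl]; simp
          by_cases hc2 : 2 ≤ ((k :: rest).filter (fun x => pv_popularity d x == M)).length
          · exact ih2 hc2
          · have hc1 : ((k :: rest).filter (fun x => pv_popularity d x == M)).length = 1 :=
              Nat.le_antisymm (Nat.lt_succ_iff.mp (Nat.not_le.mp hc2)) hatt
            rw [ih3 hc1, hmult', if_pos (hkeq.trans hMdef)]
        · rw [hsplit] at h2
          rw [if_neg hl] at h2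
          exact ih2 (by omega)
      · -- count = 1 → flag = conditional
        intro h1
        rw [hloop]
        rw [hM'] at h1
        rw [hsplit] at h1
        by_cases hl : pv_popularity d largest = M
        · exfalso
          rw [if_pos hl] at h1
          omega
        · rw [if_neg hl] at h1
          have hc1 : ((k :: rest).filter (fun x => pv_popularity d x == M)).length = 1 := by
            omega
          rw [if_neg (fun hcc => hl (hcc.trans hM'))]
          rw [ih3 hc1]
          by_cases hk : pv_popularity d k = M
          · have hb : (pv_popularity d k == pv_popularity d largest) = false := by
              rw [hk]
              simp
              intro hcontra
              exact hl hcontra.symm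
            rw [if_pos (hk.trans hMdef), hb]
          · rw [if_neg (fun hcc => hk (hcc.trans hMdef.symm))]
    · -- no-update branch
      push_neg at h
      have hmax : max (pv_popularity d largest) (pv_popularity d k) = pv_popularity d largest :=
        max_eq_left (le_of_lt h)
      have hloop : pv_loopA d (k :: rest) largest mult = pv_loopA d rest largest mult := by
        simp [pv_loopA, not_le.mpr h]
      have hM' : ((k :: rest).map (pv_popularity d)).foldl max (pv_popularity d largest) =
          (rest.map (pv_popularity d)).foldl max (pv_popularity d largest) := by
        simp [List.foldl_cons, hmax]
      obtain ⟨⟨ih1, ih1m⟩, ih2, ih3⟩ := ih largest mult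
      set M := (rest.map (pv_popularity d)).foldl max (pv_popularity d largest) with hMdef
      have hlM : pv_popularity d largest ≤ M := (PySem.List.le_foldl_max _ _).1
      have hkne : (pv_popularity d k == M) = false := by
        simp
        intro hcontra
        omega
      have hfilter : ((largest :: k :: rest).filter (fun x => pv_popularity d x == M)) =
          ((largest :: rest).filter (fun x => pv_popularity d x == M)) := by
        simp [List.filter_cons, hkne]
      refine ⟨⟨?_, ?_⟩, ?_, ?_⟩
      · rw [hloop, hM', ih1]
      · rw [hloop]
        rcases List.mem_cons.mp ih1m with h' | h'
        · simp [h']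
        · exact List.mem_cons_of_mem _ (List.mem_cons_of_mem _ h')
      · intro h2
        rw [hloop]
        rw [hM', hfilter] at h2
        exact ih2 h2
      · intro h1
        rw [hloop]
        rw [hM', hfilter] at h1
        rw [ih3 h1, hM']

-- a list of length 1 has all its members equal
theorem pv_mem_eq_of_length_one {α : Type} {l : List α} {x y : α}
    (h1 : l.length = 1) (hx : x ∈ l) (hy : y ∈ l) : x = y := by
  cases l with
  | nil => simp at hx
  | cons a t =>
    have ht : t = [] := by simpa using h1
    subst ht
    simp at hx hy
    rw [hx, hy]

-- ===== VERDICT (by name: the statement is the Claim_ definition above) =====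
theorem most_popular_spec : Claim_equal_most_popular := by
  intro rtd d1 d2 _hdom _hpre
  unfold Spec_most_popular most_popular most_popular_alt
  set d := PySem.Dict.ofList rtd with hd
  dsimp only
  have hnd : d.keys.Nodup := PySem.Dict.nodup_keys_ofList rtd
  rw [PySem.List.foldl_append_ite_eq_filter, List.nil_append]
  rw [PySem.Dict.items_eq_map_keys d hnd [], List.filter_map, List.map_map]
  set pred : String → Bool := fun k =>
    decide (d1 ≤ (PySem.List.pyGetD (PySem.Dict.getD d k []) 0 (0, 0, 0, 0, 0)).2.1 ∧
      (PySem.List.pyGetD (PySem.Dict.getD d k []) 0 (0, 0, 0, 0, 0)).2.1 < d2 + 1) with hpred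
  set g : String → String × Int := fun k => (k, pv_popularity d k) with hg
  have hcomp1 : ((fun kv : String × List (Int × Int × Int × Int × Int) =>
      decide (d1 ≤ (PySem.List.pyGetD kv.2 0 (0, 0, 0, 0, 0)).2.1 ∧
        (PySem.List.pyGetD kv.2 0 (0, 0, 0, 0, 0)).2.1 < d2 + 1)) ∘
      (fun k => (k, PySem.Dict.getD d k []))) = pred := rfl
  have hcomp2 : ((fun kv : String × List (Int × Int × Int × Int × Int) => (kv.1, pv_score kv.2)) ∘
      (fun k => (k, PySem.Dict.getD d k []))) = g := rfl
  rw [hcomp1, hcomp2]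
  cases hcase : d.keys.filter pred with
  | nil => rfl
  | cons k0 rest =>
    dsimp only
    -- A's side
    obtain ⟨⟨h1, h1m⟩, h2, h3⟩ := pv_loopA_spec d rest k0 false
    set M := (rest.map (pv_popularity d)).foldl max (pv_popularity d k0) with hM
    -- B's side: the sorted pair list
    set pairs := (k0 :: rest).map g with hpairs
    set scored := PySem.List.sorted pairs (fun p => p.2) true with hscored
    have hperm : scored.Perm pairs := PySem.List.sorted_perm pairs (fun p => p.2) true
    have hpw : scored.Pairwise (fun a b => b.2 ≤ a.2) :=
      PySem.List.sorted_pairwise_rev pairs (fun p => p.2)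
    -- every popularity in k0 :: rest is ≤ M, and M is attained
    have hleM : ∀ k ∈ k0 :: rest, pv_popularity d k ≤ M := by
      intro k hk
      rcases List.mem_cons.mp hk with h' | h'
      · rw [h']; exact (PySem.List.le_foldl_max _ _).1
      · exact (PySem.List.le_foldl_max (rest.map (pv_popularity d)) _).2 _
          (List.mem_map_of_mem h')
    have hattain : ∃ k ∈ k0 :: rest, pv_popularity d k = M := by
      rcases PySem.List.foldl_max_mem (rest.map (pv_popularity d)) (pv_popularity d k0) with hc | hc
      · exact ⟨k0, List.mem_cons_self, hc.symm⟩
      · obtain ⟨x, hx, hxv⟩ := List.mem_map.mp hc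
        exact ⟨x, List.mem_cons_of_mem _ hx, hxv⟩
    -- counts: over the keys, over pairs, over scored — all equal
    have hcntp : (pairs.filter (fun y => y.2 == M)).length =
        ((k0 :: rest).filter (fun k => pv_popularity d k == M)).length := by
      rw [hpairs, List.filter_map, List.length_map]
      rfl
    have hcnts : (scored.filter (fun y => y.2 == M)).length =
        (pairs.filter (fun y => y.2 == M)).length := (hperm.filter _).length_eq
    -- scored is nonempty
    cases hsc : scored with
    | nil =>
      exfalso
      have := hperm.length_eq
      rw [hsc, hpairs] at this
      simp at this
    | cons x0 s =>
      -- the head of scored attains M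
      have hx0mem : x0 ∈ pairs := hperm.subset (by rw [hsc]; exact List.mem_cons_self)
      have hx0M : x0.2 = M := by
        obtain ⟨k, hk, hkx⟩ := List.mem_map.mp hx0mem
        have hub : ∀ y ∈ pairs, y.2 ≤ x0.2 := by
          intro y hy
          exact PySem.List.key_head_sorted_rev_ge pairs (fun p => p.2) (hscored ▸ hsc) y hy
        obtain ⟨ka, hka, hkaM⟩ := hattain
        have h1le : M ≤ x0.2 := by
          have := hub (g ka) (List.mem_map_of_mem hka)
          rw [hg] at this
          simpa [hkaM] using this
        have h2le : x0.2 ≤ M := by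
          rw [← hkx, hg]
          exact hleM k hk
        omega
      cases hs : s with
      | nil =>
        -- single candidate: rest = [], A returns k0, B returns x0.1 = k0
        have hlen : pairs.length = 1 := by
          have := hperm.length_eq
          rw [hsc, hs] at this
          simpa using this.symm
        have hrest : rest = [] := by
          rw [hpairs] at hlen
          simp at hlen
          exact hlen
        subst hrest
        have hx0 : x0 = g k0 := by
          rw [hpairs] at hx0mem
          simpa using hx0mem
        simp [pv_loopA, hx0, hg]
      | cons x1 t =>
        -- at least two candidates
        have hx1mem : x1 ∈ scored := by rw [hsc, hs]; simp
        have hx1le : x1.2 ≤ x0.2 := by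
          rw [hsc, hs] at hpw
          exact (List.pairwise_cons.mp hpw).1 x1 List.mem_cons_self
        by_cases hx1 : x1.2 = M
        · -- tie: count ≥ 2, A's flag is true, B sees equal top two
          have hc2 : 2 ≤ ((k0 :: rest).filter (fun k => pv_popularity d k == M)).length := by
            rw [← hcntp, ← hcnts, hsc, hs]
            simp [hx0M, hx1]
          rw [h2 hc2]
          have hb : (x1.2 == x0.2) = true := by simp [hx1, hx0M]
          simp [hb]
        · -- unique winner: count = 1, A returns the attainer, B returns the head
          have hfilter_tail : ((x1 :: t).filter (fun y => y.2 == M)) = [] := by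
            rw [List.filter_eq_nil_iff]
            intro y hy
            rcases List.mem_cons.mp hy with h' | h'
            · simp [h', hx1]
            · have hyle : y.2 ≤ x1.2 := by
                rw [hsc, hs] at hpw
                have := (List.pairwise_cons.mp (List.pairwise_cons.mp hpw).2).1 y h'
                exact this
              simp
              intro hyM
              rw [hyM] at hyle
              have : x1.2 = M := le_antisymm (hx1le.trans_eq hx0M) (hyle)
              exact hx1 this
          have hfx0 : List.filter (fun y => y.2 == M) (x0 :: x1 :: t) = [x0] := by
            rw [List.filter_cons_of_pos (by simp [hx0M]), hfilter_tail]
          have hc1 : ((k0 :: rest).filter (fun k => pv_popularity d k == M)).length = 1 := by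
            rw [← hcntp, ← hcnts, hsc, hs, hfx0]
            rfl
          have hflag : (pv_loopA d rest k0 false).2 = false := by
            rw [h3 hc1]
            split <;> rfl
          rw [hflag]
          have hne : (x1.2 == x0.2) = false := by
            simp [hx0M]
            intro hcontra
            exact hx1 hcontra
          -- both x0 and g r.1 lie in the length-1 filter of pairs
          have hx0f : x0 ∈ pairs.filter (fun y => y.2 == M) :=
            List.mem_filter.mpr ⟨hx0mem, by simp [hx0M]⟩
          have hrf : g (pv_loopA d rest k0 false).1 ∈ pairs.filter (fun y => y.2 == M) :=
            List.mem_filter.mpr ⟨List.mem_map_of_mem h1m, by simp [hg, h1]⟩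
          have hlen1 : (pairs.filter (fun y => y.2 == M)).length = 1 := by
            rw [hcntp]; exact hc1
          have heq := pv_mem_eq_of_length_one hlen1 hx0f hrf
          have hx01 : x0.1 = (pv_loopA d rest k0 false).1 := by rw [heq]
          simp [hne, ← hx01]
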